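-- pv_equiv track=rewrite | github.com/MohiuddinSohel/Leetcoding | 1655. Distribute Repeating Integers.py | canDistribute
-- ===== SOURCE A (Python) =====
-- from collections import Counter, defaultdict
-- from typing import List
--
-- def canDistribute(nums: List[int], quantity: List[int]) -> bool:
--     def dfsWithMemo(index, mask):
--         if mask == end_mask:
--             return True
--         elif index == len(counter_key):
--             return False
--         elif (index, mask) not in dp:
--             sub_mask = remaining_mask = end_mask ^ mask
--             # generate all submask of current remaining mask
--             while sub_mask > 0:
--                 # choose counter[counter_key[index]] to fill sub_mask
--                 if mask_total[sub_mask] <= counter[counter_key[index]]: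
--                     dp[(index, mask)] = dfsWithMemo(index + 1, mask | sub_mask)
--                     if dp[(index, mask)]:
--                         return dp[(index, mask)]
--                 sub_mask = (sub_mask - 1) & remaining_mask
--             # not choosing counter[counter_key[index]]
--             dp[(index, mask)] = dfsWithMemo(index + 1, mask)
--         return dp[(index, mask)]
--
--     m, counter = len(quantity), Counter(nums)
--     # have to fit m quantity in m largest nums count, not in all nums
--     counter_key = sorted(counter, key=lambda x: counter[x])[-m:]
--     end_mask, dp, mask_total = (1 << m) - 1, defaultdict(int), defaultdict(int)
--
--     # generate all_mask and there corresponding total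
--     for i in range(end_mask + 1):
--         total, current_bit, current_mask = 0, 0, i
--         for current_bit in range(m):
--             if current_mask & (1 << current_bit):
--                 total += quantity[current_bit]
--         mask_total[current_mask] = total
--
--     return dfsWithMemo(0, 0)
--
--     def backtrack(q_i):
--         if q_i == len(quantity):
--             return True
--         for key in counter_key:
--             if counter[key] < quantity[q_i]:
--                 continue
--             counter[key] -= quantity[q_i]
--             if backtrack(q_i + 1):
--                 return True
--             counter[key] += quantity[q_i]
--         return False
--
--     counter = Counter(nums)
--     # have to fit m quantity in m largest nums count, not in all nums
--     counter_key = sorted(counter, key=lambda x: counter[x])[-len(quantity):]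
--     # if biggest quantity can not fit in any container, we do not have to check other combination
--     quantity.sort(reverse=True)
--     return backtrack(0)
-- ===== SOURCE B (Python) =====
-- from collections import Counter
-- from typing import List
--
-- def canDistribute(nums: List[int], quantity: List[int]) -> bool:
--     # backtracking over demands (largest first) into the m largest count buckets,
--     # skipping buckets with a remaining capacity already tried at the same level
--     counts = sorted(Counter(nums).values(), reverse=True)[:len(quantity)]
--     demands = sorted(quantity, reverse=True)
--
--     def place(i):
--         if i == len(demands):
--             return True
--         d = demands[i]
--         tried = set()
--         for j in range(len(counts)):
--             c = counts[j]
--             if d <= c and c not in tried: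
--                 tried.add(c)
--                 counts[j] = c - d
--                 if place(i + 1):
--                     return True
--                 counts[j] = c
--         return False
--
--     return place(0)
-- ===== Notes on version B (the rewrite author's own statement) =====
-- stated objective: alternative
-- what changed: Replaces A's memoized bitmask DP over demand submasks (which first tabulates the sum of every one of the 2^m masks) by recursive backtracking that places the demands, sorted descending, one at a time into the m largest count buckets, skipping buckets whose remaining capacity was already tried at the same level.
-- outside the precondition, e.g. on canDistribute([1], [5, -5]): A returns True, B returns False
import Mathlib
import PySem

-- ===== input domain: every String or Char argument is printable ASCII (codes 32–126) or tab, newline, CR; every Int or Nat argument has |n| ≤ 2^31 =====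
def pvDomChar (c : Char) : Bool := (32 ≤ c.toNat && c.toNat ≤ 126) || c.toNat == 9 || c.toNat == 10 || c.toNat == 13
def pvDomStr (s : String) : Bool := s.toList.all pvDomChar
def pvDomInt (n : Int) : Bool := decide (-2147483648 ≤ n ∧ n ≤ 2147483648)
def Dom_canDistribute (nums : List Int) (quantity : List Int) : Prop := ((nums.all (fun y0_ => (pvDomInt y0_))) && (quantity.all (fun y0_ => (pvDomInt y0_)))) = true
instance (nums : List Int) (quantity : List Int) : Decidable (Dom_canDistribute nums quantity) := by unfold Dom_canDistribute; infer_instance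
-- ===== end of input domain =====

-- B replaces A's memoized bitmask-DP over demand submasks by recursive backtracking that
-- places the (descending-sorted) demands one at a time into the m largest count buckets.


-- ===== PORT A =====
mutual
/-- the `while sub_mask > 0` loop inside `dfsWithMemo`; `h` records that this loop only
runs after the `index == len(counter_key)` test failed (needed for termination). -/
def pvLoopA (ck : List Int) (counter : PySem.Dict Int Int) (maskTotal : PySem.Dict Nat Int)
    (endMask : Nat) (index mask rem sub : Nat) (dp : PySem.Dict (Nat × Nat) Bool)
    (h : index < ck.length) : Bool × PySem.Dict (Nat × Nat) Bool :=
  if 0 < sub then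
    if maskTotal.getD sub 0 ≤ counter.getD (PySem.List.pyGetD ck (index : Int) 0) 0 then
      match pvDfsA ck counter maskTotal endMask (index + 1) (mask ||| sub) dp with
      | (v, dp1) =>
        let dp2 := dp1.insert (index, mask) v
        if v then (v, dp2)
        else pvLoopA ck counter maskTotal endMask index mask rem ((sub - 1) &&& rem) dp2 h
    else pvLoopA ck counter maskTotal endMask index mask rem ((sub - 1) &&& rem) dp h
  else
    match pvDfsA ck counter maskTotal endMask (index + 1) mask dp with
    | (v, dp1) => (v, dp1.insert (index, mask) v)
termination_by (ck.length - index, 0, sub)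
decreasing_by
  · exact Prod.Lex.left _ _ (by omega)
  · exact Prod.Lex.right _ (Prod.Lex.right _ (by
      have := Nat.and_le_left (n := sub - 1) (m := rem); omega))
  · exact Prod.Lex.right _ (Prod.Lex.right _ (by
      have := Nat.and_le_left (n := sub - 1) (m := rem); omega))
  · exact Prod.Lex.left _ _ (by omega)

/-- `dfsWithMemo(index, mask)`, threading the memo dict `dp`.  The Python test
`index == len(counter_key)` is written `≤` (the same test: `index` never exceeds the length). -/
def pvDfsA (ck : List Int) (counter : PySem.Dict Int Int) (maskTotal : PySem.Dict Nat Int)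
    (endMask : Nat) (index mask : Nat) (dp : PySem.Dict (Nat × Nat) Bool) :
    Bool × PySem.Dict (Nat × Nat) Bool :=
  if mask = endMask then (true, dp)
  else if h : ck.length ≤ index then (false, dp)
  else if (dp.get? (index, mask)).isSome then ((dp.get? (index, mask)).getD false, dp)
  else
    pvLoopA ck counter maskTotal endMask index mask (endMask ^^^ mask) (endMask ^^^ mask) dp
      (by omega)
termination_by (ck.length - index, 1, 0)
decreasing_by
  · exact Prod.Lex.right _ (Prod.Lex.left _ _ (by omega))
end

def canDistribute (nums : List Int) (quantity : List Int) : Bool :=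
  let m := quantity.length
  let counter := PySem.Dict.counter nums
  let counterKey := PySem.List.slice
    (PySem.List.sorted counter.keys (fun x => counter.getD x 0)) (some (-(m : Int))) none
  let endMask : Nat := (1 <<< m) - 1
  -- masks are the naturals 0 .. endMask, so `range(end_mask + 1)` / `range(m)` are `List.range` (exact)
  let maskTotal : PySem.Dict Nat Int :=
    (List.range (endMask + 1)).foldl (fun d i =>
      d.insert i ((List.range m).foldl (fun total b =>
        if i &&& (1 <<< b) ≠ 0 then total + PySem.List.pyGetD quantity (b : Int) 0 else total) 0))
      PySem.Dict.empty
  (pvDfsA counterKey counter maskTotal endMask 0 0 PySem.Dict.empty).1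

-- ===== PORT B =====
mutual
/-- the `for j in range(len(counts))` loop of `place`, with the per-level `tried` set. -/
def pvLoopB (d : Int) (ds : List Int) (counts : List Int) (j : Nat) (tried : PySem.Set Int) :
    Bool :=
  if hj : j < counts.length then
    let c := counts[j]
    if d ≤ c && !(PySem.Set.contains tried c) then
      if pvPlaceB ds (counts.set j (c - d)) then true
      else pvLoopB d ds counts (j + 1) (PySem.Set.add tried c)
    else pvLoopB d ds counts (j + 1) tried
  else false
termination_by (ds.length + 1, counts.length - j)
decreasing_by
  · exact Prod.Lex.left _ _ (by omega)
  · exact Prod.Lex.right _ (by omega)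
  · exact Prod.Lex.right _ (by omega)

/-- `place(i)`: the remaining demands `demands[i:]` are the list argument. -/
def pvPlaceB (demands : List Int) (counts : List Int) : Bool :=
  match demands with
  | [] => true
  | d :: ds => pvLoopB d ds counts 0 PySem.Set.empty
termination_by (demands.length, counts.length + 1)
decreasing_by
  · simp only [List.length_cons]; exact Prod.Lex.right _ (by omega)
end

def canDistribute_alt (nums : List Int) (quantity : List Int) : Bool :=
  let counts := PySem.List.slice
    (PySem.List.sorted (PySem.Dict.counter nums).values (fun x => x) true)
    none (some (quantity.length : Int))
  let demands := PySem.List.sorted quantity (fun x => x) true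
  pvPlaceB demands counts

-- ===== PRECONDITION & SPEC =====
-- Pre_ restricts to the problem's natural domain: it excludes quantity lists that mix a
-- negative with a positive demand while nums is nonempty (LeetCode guarantees
-- quantity[i] ≥ 1); on a mixed-sign quantity A's subset-sum check lets a negative demand
-- offset an oversized one inside one bucket, which one-at-a-time placement cannot express.
def Pre_canDistribute (nums : List Int) (quantity : List Int) : Prop :=
  (∀ x ∈ quantity, 0 ≤ x) ∨ (∀ x ∈ quantity, x ≤ 0) ∨ nums = []
instance (nums : List Int) (quantity : List Int) : Decidable (Pre_canDistribute nums quantity) := by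
  unfold Pre_canDistribute; infer_instance

def pvWitness_canDistribute : List Int × List Int := ([1, 1, 2], [2, 1])

def Spec_canDistribute (nums : List Int) (quantity : List Int) (out : Bool) : Prop :=
  out = canDistribute_alt nums quantity
instance (nums : List Int) (quantity : List Int) (out : Bool) :
    Decidable (Spec_canDistribute nums quantity out) := by unfold Spec_canDistribute; infer_instance

-- ===== CLAIM (what is proved, stated in full; the proofs are below) =====
def Claim_equal_canDistribute : Prop := ∀ (nums : List Int) (quantity : List Int),
  Dom_canDistribute nums quantity → Pre_canDistribute nums quantity →
    Spec_canDistribute nums quantity (canDistribute nums quantity)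

-- ===== LEMMAS AND PROOFS =====

-- ---------- bit toolkit ----------
/-- parity of a Nat `&&&`. -/
lemma pvLandParity (a b : Nat) : (a &&& b) % 2 = 1 ↔ (a % 2 = 1 ∧ b % 2 = 1) := by
  have h := Nat.testBit_and a b 0
  simp only [Nat.testBit_zero] at h
  have h2 := congrArg (fun x => x = true) h
  simp only [decide_eq_true_eq, Bool.and_eq_true] at h2
  exact iff_of_eq h2

/-- submask-enumeration step: every nonzero submask of `rem` strictly below `sub`
is at most `(sub - 1) &&& rem`. -/
lemma pvSubEnum : ∀ rem sub s : Nat, sub &&& rem = sub → s &&& rem = s →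
    0 < s → s < sub → s ≤ (sub - 1) &&& rem := by
  intro rem
  induction rem using Nat.strong_induction_on with
  | _ rem IH =>
    intro sub s hsub hs hs0 hlt
    rcases Nat.eq_zero_or_pos rem with h0 | hpos
    · subst h0; simp [Nat.and_zero] at hsub; omega
    have hsub2 : sub / 2 &&& rem / 2 = sub / 2 := by rw [← Nat.and_div_two, hsub]
    have hs2 : s / 2 &&& rem / 2 = s / 2 := by rw [← Nat.and_div_two, hs]
    have hsubp := pvLandParity sub rem
    have hsp := pvLandParity s rem
    rw [hsub] at hsubp; rw [hs] at hsp
    have hxd : ((sub - 1) &&& rem) / 2 = (sub - 1) / 2 &&& rem / 2 := Nat.and_div_two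
    have hxp := pvLandParity (sub - 1) rem
    have m2 : ∀ a : Nat, a % 2 = 0 ∨ a % 2 = 1 := fun a => by omega
    rcases m2 sub with he | ho
    · -- sub even, sub ≥ 2
      have hsub1 : (sub - 1) / 2 = sub / 2 - 1 := by omega
      have hsub1p : (sub - 1) % 2 = 1 := by omega
      rcases m2 s with hse | hso
      · -- s even
        have h2 : s / 2 ≤ (sub / 2 - 1) &&& rem / 2 := by
          apply IH (rem / 2) (by omega) (sub / 2) (s / 2) hsub2 hs2 (by omega) (by omega)
        rw [← hsub1] at h2
        have := Nat.div_add_mod ((sub - 1) &&& rem) 2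
        rw [hxd] at this
        omega
      · -- s odd: rem odd, x odd
        have hro : rem % 2 = 1 := (hsp.mp hso).2
        have hxo : ((sub - 1) &&& rem) % 2 = 1 := hxp.mpr ⟨hsub1p, hro⟩
        have := Nat.div_add_mod ((sub - 1) &&& rem) 2
        rw [hxd] at this
        rcases Nat.eq_zero_or_pos (s / 2) with hz | hp
        · -- s = 1
          omega
        · have h2 : s / 2 ≤ (sub / 2 - 1) &&& rem / 2 := by
            apply IH (rem / 2) (by omega) (sub / 2) (s / 2) hsub2 hs2 (by omega) (by omega)
          rw [← hsub1] at h2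
          omega
    · -- sub odd: (sub-1) is a submask of rem itself
      have hsub1 : (sub - 1) / 2 = sub / 2 := by omega
      have hsub1p : (sub - 1) % 2 = 0 := by omega
      have hxe : ¬ ((sub - 1) &&& rem) % 2 = 1 := fun hc => by
        have := (hxp.mp hc).1; omega
      have hdiv : ((sub - 1) &&& rem) / 2 = sub / 2 := by rw [hxd, hsub1, hsub2]
      have := Nat.div_add_mod ((sub - 1) &&& rem) 2
      omega

lemma pvAndIdem (x rem : Nat) : (x &&& rem) &&& rem = x &&& rem := by
  apply Nat.eq_of_testBit_eq; intro i
  simp only [Nat.testBit_and]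
  cases hx : x.testBit i <;> cases hr : rem.testBit i <;> simp

lemma pvXorSub (s rem : Nat) (h : s &&& rem = s) : (rem ^^^ s) &&& rem = rem ^^^ s := by
  apply Nat.eq_of_testBit_eq; intro i
  have h' := congrArg (fun x => x.testBit i) h
  simp only [Nat.testBit_and, Nat.testBit_xor] at *
  cases h1 : s.testBit i <;> cases h2 : rem.testBit i <;> simp_all

lemma pvOrMask (mask e s : Nat) (hm : mask &&& e = mask) (hs : s &&& (e ^^^ mask) = s) :
    (mask ||| s) &&& e = (mask ||| s) ∧ e ^^^ (mask ||| s) = (e ^^^ mask) ^^^ s := by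
  constructor <;>
  · apply Nat.eq_of_testBit_eq; intro i
    have hm' := congrArg (fun x => x.testBit i) hm
    have hs' := congrArg (fun x => x.testBit i) hs
    simp only [Nat.testBit_and, Nat.testBit_or, Nat.testBit_xor] at *
    cases h1 : mask.testBit i <;> cases h2 : e.testBit i <;> cases h3 : s.testBit i <;> simp_all

lemma pvSubLt (s rem : Nat) (h : s &&& rem = s) : s ≤ rem := by
  rw [← h]; exact Nat.and_le_right

-- ---------- pure semantics of A's dfs ----------
/-- total demand of the mask `s` (what `mask_total[s]` holds). -/
def pvMsum (q : List Int) (s : Nat) : Int :=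
  ∑ b ∈ Finset.range q.length, if s.testBit b then q.getD b 0 else 0

/-- What `dfsWithMemo` decides, memoization removed: going through the capacity list,
each capacity takes some (possibly empty) submask of the remaining demand mask,
within its budget; success when the remaining mask is exhausted. -/
def pvFA (q : List Int) : List Int → Nat → Prop
  | [], rem => rem = 0
  | c :: cs, rem => rem = 0 ∨
      (∃ s : Nat, s &&& rem = s ∧ 0 < s ∧ pvMsum q s ≤ c ∧ pvFA q cs (rem ^^^ s)) ∨
      pvFA q cs rem

lemma pvFA_zero (q : List Int) : ∀ caps : List Int, pvFA q caps 0 := by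
  intro caps; cases caps <;> simp [pvFA]

-- ---------- assignment-form of feasibility (the exchange pivot) ----------
/-- total demand assigned to bucket `j` by the assignment `g` of demand bits. -/
def pvLoad (q : List Int) (g : Nat → Nat) (j : Nat) (rem : Nat) : Int :=
  ∑ b ∈ Finset.range q.length, if rem.testBit b ∧ g b = j then q.getD b 0 else 0

/-- the demands in the mask `rem` can be assigned to the buckets `caps` within budgets. -/
def pvFeas (q : List Int) (caps : List Int) (rem : Nat) : Prop :=
  ∃ g : Nat → Nat, (∀ b, b < q.length → rem.testBit b → g b < caps.length) ∧
    ∀ j (_ : j < caps.length), pvLoad q g j rem ≤ caps[j]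

/-- B's backtracking, loop and pruning removed: place each demand in turn into some
bucket with enough remaining capacity. -/
def pvGL : List Int → List Int → Prop
  | [], _ => True
  | d :: ds, caps => ∃ j, ∃ _ : j < caps.length, d ≤ caps[j] ∧
      pvGL ds (caps.set j (caps[j] - d))

-- ---------- memoization correctness ----------
/-- memo-dict invariant: every stored entry at a level ≥ lo is the pure dfs value. -/
def pvInvGe (q caps : List Int) (endMask lo : Nat) (dp : PySem.Dict (Nat × Nat) Bool) : Prop :=
  ∀ i msk v, lo ≤ i → msk &&& endMask = msk → dp.get? (i, msk) = some v →
    (v = true ↔ pvFA q (caps.drop i) (endMask ^^^ msk))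

/-- the full specification of `pvDfsA` (value and final dict) used in the induction. -/
def pvDfsSpec (q ck : List Int) (counter : PySem.Dict Int Int) (maskTotal : PySem.Dict Nat Int)
    (endMask : Nat) (caps : List Int) (index : Nat) : Prop :=
  ∀ mask dp, mask &&& endMask = mask → pvInvGe q caps endMask index dp →
    ((pvDfsA ck counter maskTotal endMask index mask dp).1 = true ↔
      pvFA q (caps.drop index) (endMask ^^^ mask)) ∧
    pvInvGe q caps endMask index (pvDfsA ck counter maskTotal endMask index mask dp).2 ∧
    (∀ i msk, i ≤ index → (i, msk) ≠ (index, mask) →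
      (pvDfsA ck counter maskTotal endMask index mask dp).2.get? (i, msk) = dp.get? (i, msk))

lemma pvLoopA_spec (q ck : List Int) (counter : PySem.Dict Int Int)
    (maskTotal : PySem.Dict Nat Int) (endMask : Nat) (caps : List Int)
    (hcaps : caps = ck.map (fun k => counter.getD k 0))
    (hmt : ∀ s : Nat, s ≤ endMask → maskTotal.getD s 0 = pvMsum q s)
    (index : Nat) (hidx : index < ck.length) (hclen : index < caps.length)
    (IH : pvDfsSpec q ck counter maskTotal endMask caps (index + 1))
    (mask : Nat) (hm : mask &&& endMask = mask) :
    ∀ sub, sub &&& (endMask ^^^ mask) = sub →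
    ∀ dp, pvInvGe q caps endMask (index + 1) dp →
      ((pvLoopA ck counter maskTotal endMask index mask (endMask ^^^ mask) sub dp hidx).1 = true ↔
        ((∃ s, s &&& (endMask ^^^ mask) = s ∧ 0 < s ∧ s ≤ sub ∧ pvMsum q s ≤ caps[index] ∧
          pvFA q (caps.drop (index + 1)) ((endMask ^^^ mask) ^^^ s)) ∨
          pvFA q (caps.drop (index + 1)) (endMask ^^^ mask))) ∧
      pvInvGe q caps endMask (index + 1)
        (pvLoopA ck counter maskTotal endMask index mask (endMask ^^^ mask) sub dp hidx).2 ∧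
      (pvLoopA ck counter maskTotal endMask index mask (endMask ^^^ mask) sub dp hidx).2.get?
        (index, mask) =
        some (pvLoopA ck counter maskTotal endMask index mask (endMask ^^^ mask) sub dp hidx).1 ∧
      (∀ i msk, i ≤ index → (i, msk) ≠ (index, mask) →
        (pvLoopA ck counter maskTotal endMask index mask (endMask ^^^ mask) sub dp hidx).2.get?
          (i, msk) = dp.get? (i, msk)) := by
  have hrem : (endMask ^^^ mask) &&& endMask = endMask ^^^ mask :=
    pvXorSub mask endMask hm
  have hcap : counter.getD (PySem.List.pyGetD ck (index : Int) 0) 0 = caps[index] := by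
    have h1 : PySem.List.pyGetD ck (index : Int) 0 = ck[index] := by
      rw [PySem.List.pyGetD_natCast]; exact List.getD_eq_getElem ck 0 hidx
    subst hcaps; simp [h1]
  intro sub
  induction sub using Nat.strong_induction_on with
  | _ sub IHs =>
    intro hsubm dp hinv
    have hsuble : sub ≤ endMask := by
      have h1 := pvSubLt sub _ hsubm
      have h2 := pvSubLt _ _ hrem
      omega
    rw [pvLoopA]
    by_cases hpos : 0 < sub
    · simp only [if_pos hpos, hmt sub hsuble, hcap]
      have hsub' : ((sub - 1) &&& (endMask ^^^ mask)) &&& (endMask ^^^ mask) =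
          (sub - 1) &&& (endMask ^^^ mask) := pvAndIdem _ _
      have hsublt : (sub - 1) &&& (endMask ^^^ mask) < sub := by
        have := Nat.and_le_left (n := sub - 1) (m := endMask ^^^ mask); omega
      by_cases hcond : pvMsum q sub ≤ caps[index]
      · simp only [if_pos hcond]
        have hm2 := pvOrMask mask endMask sub hm hsubm
        rcases hres : pvDfsA ck counter maskTotal endMask (index + 1) (mask ||| sub) dp with ⟨v, dp1⟩
        obtain ⟨hval, hinv1, hframe1⟩ := IH (mask ||| sub) dp hm2.1 hinv
        rw [hres] at hval hinv1 hframe1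
        simp only [hm2.2] at hval
        by_cases hv : v = true
        · subst hv
          simp only [reduceIte]
          refine ⟨?_, ?_, ?_, ?_⟩
          · constructor
            · intro _; exact Or.inl ⟨sub, hsubm, hpos, le_refl _, hcond, hval.mp rfl⟩
            · intro _; simp
          · intro i msk w hi hmsk hget
            rcases eq_or_ne (i, msk) (index, mask) with he | hne
            · exact absurd he (by intro hc; cases hc; omega)
            · rw [PySem.Dict.get?_insert_of_ne _ _ hne] at hget
              exact hinv1 i msk w hi hmsk hget
          · exact PySem.Dict.get?_insert_self _ _ _
          · intro i msk hi hne
            rw [PySem.Dict.get?_insert_of_ne _ _ hne]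
            exact hframe1 i msk (by omega) (by intro hc; cases hc; omega)
        · replace hv : v = false := by cases v <;> simp_all
          subst hv
          simp only [Bool.false_eq_true, reduceIte]
          have hFAfalse : ¬ pvFA q (caps.drop (index + 1)) ((endMask ^^^ mask) ^^^ sub) := by
            intro hc; exact absurd (hval.mpr hc) (by simp)
          have hinv2 : pvInvGe q caps endMask (index + 1)
              (dp1.insert (index, mask) false) := by
            intro i msk w hi hmsk hget
            rcases eq_or_ne (i, msk) (index, mask) with he | hne
            · exact absurd he (by intro hc; cases hc; omega)
            · rw [PySem.Dict.get?_insert_of_ne _ _ hne] at hget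
              exact hinv1 i msk w hi hmsk hget
          obtain ⟨hval', hinv', hget', hframe'⟩ :=
            IHs ((sub - 1) &&& (endMask ^^^ mask)) hsublt hsub'
              (dp1.insert (index, mask) false) hinv2
          refine ⟨?_, hinv', hget', ?_⟩
          · rw [hval']
            constructor
            · rintro (⟨s, h1, h2, h3, h4, h5⟩ | h)
              · exact Or.inl ⟨s, h1, h2, by
                  have := Nat.and_le_left (n := sub - 1) (m := endMask ^^^ mask); omega,
                  h4, h5⟩
              · exact Or.inr h
            · rintro (⟨s, h1, h2, h3, h4, h5⟩ | h)
              · rcases eq_or_ne s sub with he | hne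
                · subst he; exact absurd h5 hFAfalse
                · exact Or.inl ⟨s, h1, h2, pvSubEnum _ _ _ hsubm h1 h2 (by omega), h4, h5⟩
              · exact Or.inr h
          · intro i msk hi hne
            rw [hframe' i msk hi hne, PySem.Dict.get?_insert_of_ne _ _ hne]
            exact hframe1 i msk (by omega) (by intro hc; cases hc; omega)
      · simp only [if_neg hcond]
        obtain ⟨hval', hinv', hget', hframe'⟩ :=
          IHs ((sub - 1) &&& (endMask ^^^ mask)) hsublt hsub' dp hinv
        refine ⟨?_, hinv', hget', hframe'⟩
        rw [hval']
        constructor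
        · rintro (⟨s, h1, h2, h3, h4, h5⟩ | h)
          · exact Or.inl ⟨s, h1, h2, by
              have := Nat.and_le_left (n := sub - 1) (m := endMask ^^^ mask); omega,
              h4, h5⟩
          · exact Or.inr h
        · rintro (⟨s, h1, h2, h3, h4, h5⟩ | h)
          · rcases eq_or_ne s sub with he | hne
            · subst he; exact absurd h4 hcond
            · exact Or.inl ⟨s, h1, h2, pvSubEnum _ _ _ hsubm h1 h2 (by omega), h4, h5⟩
          · exact Or.inr h
    · simp only [if_neg hpos]
      have hsub0 : sub = 0 := by omega
      rcases hres : pvDfsA ck counter maskTotal endMask (index + 1) mask dp with ⟨v, dp1⟩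
      obtain ⟨hval, hinv1, hframe1⟩ := IH mask dp hm hinv
      rw [hres] at hval hinv1 hframe1
      refine ⟨?_, ?_, PySem.Dict.get?_insert_self _ _ _, ?_⟩
      · simp only [hval]
        constructor
        · intro h; exact Or.inr h
        · rintro (⟨s, h1, h2, h3, h4, h5⟩ | h)
          · omega
          · exact h
      · intro i msk w hi hmsk hget
        rcases eq_or_ne (i, msk) (index, mask) with he | hne
        · exact absurd he (by intro hc; cases hc; omega)
        · rw [PySem.Dict.get?_insert_of_ne _ _ hne] at hget
          exact hinv1 i msk w hi hmsk hget
      · intro i msk hi hne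
        rw [PySem.Dict.get?_insert_of_ne _ _ hne]
        exact hframe1 i msk (by omega) (by intro hc; cases hc; omega)

lemma pvDfsA_spec (q ck : List Int) (counter : PySem.Dict Int Int)
    (maskTotal : PySem.Dict Nat Int) (endMask : Nat) (caps : List Int)
    (hcaps : caps = ck.map (fun k => counter.getD k 0))
    (hend : endMask = 2 ^ q.length - 1)
    (hmt : ∀ s : Nat, s ≤ endMask → maskTotal.getD s 0 = pvMsum q s) :
    ∀ index, pvDfsSpec q ck counter maskTotal endMask caps index := by
  have main : ∀ fuel index, ck.length ≤ index + fuel →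
      pvDfsSpec q ck counter maskTotal endMask caps index := by
    intro fuel
    induction fuel with
    | zero =>
      intro index hle mask dp hm hinv
      rw [pvDfsA]
      by_cases h1 : mask = endMask
      · simp only [if_pos h1]
        refine ⟨?_, hinv, by intro i msk hh1 hh2; trivial⟩
        subst h1; simp [Nat.xor_self, pvFA_zero]
      · simp only [if_neg h1, dif_pos (by omega : ck.length ≤ index)]
        refine ⟨?_, hinv, by intro i msk hh1 hh2; trivial⟩
        have hdrop : caps.drop index = [] := by
          apply List.drop_of_length_le
          subst hcaps; simp; omega
        rw [hdrop]
        simp only [pvFA, Bool.false_eq_true, false_iff]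
        intro hc
        exact h1 (Nat.eq_of_testBit_eq (by
          have := congrArg Nat.testBit hc
          intro i
          have h2 := congrArg (fun x => x.testBit i) hc
          simp only [Nat.testBit_xor, Nat.zero_testBit] at h2
          cases hx : mask.testBit i <;> cases hy : endMask.testBit i <;> simp_all)).symm
    | succ fuel IHf =>
      intro index hle mask dp hm hinv
      rw [pvDfsA]
      by_cases h1 : mask = endMask
      · simp only [if_pos h1]
        refine ⟨?_, hinv, by intro i msk hh1 hh2; trivial⟩
        subst h1; simp [Nat.xor_self, pvFA_zero]
      · simp only [if_neg h1]
        by_cases h2 : ck.length ≤ index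
        · simp only [dif_pos h2]
          refine ⟨?_, hinv, by intro i msk hh1 hh2; trivial⟩
          have hdrop : caps.drop index = [] := by
            apply List.drop_of_length_le
            subst hcaps; simp; omega
          rw [hdrop]
          simp only [pvFA, Bool.false_eq_true, false_iff]
          intro hc
          exact h1 (Nat.eq_of_testBit_eq (by
            intro i
            have h3 := congrArg (fun x => x.testBit i) hc
            simp only [Nat.testBit_xor, Nat.zero_testBit] at h3
            cases hx : mask.testBit i <;> cases hy : endMask.testBit i <;> simp_all)).symm
        · simp only [dif_neg h2]
          have hidx : index < ck.length := by omega
          have hclen : index < caps.length := by subst hcaps; simp; omega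
          by_cases h3 : (dp.get? (index, mask)).isSome
          · simp only [if_pos h3]
            obtain ⟨v, hv⟩ := Option.isSome_iff_exists.mp h3
            refine ⟨?_, hinv, by intro i msk hh1 hh2; trivial⟩
            rw [hv]
            simpa using hinv index mask v (le_refl _) hm hv
          · simp only [if_neg h3]
            have hIH : pvDfsSpec q ck counter maskTotal endMask caps (index + 1) :=
              IHf (index + 1) (by omega)
            have hinv' : pvInvGe q caps endMask (index + 1) dp := by
              intro i msk w hi hmsk hget
              exact hinv i msk w (by omega) hmsk hget
            obtain ⟨hval, hinvL, hgetL, hframeL⟩ :=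
              pvLoopA_spec q ck counter maskTotal endMask caps hcaps hmt index hidx hclen
                hIH mask hm (endMask ^^^ mask)
                (Nat.and_self _)
                dp hinv'
            have hrem0 : endMask ^^^ mask ≠ 0 := by
              intro hc
              exact h1 (Nat.eq_of_testBit_eq (by
                intro i
                have h4 := congrArg (fun x => x.testBit i) hc
                simp only [Nat.testBit_xor, Nat.zero_testBit] at h4
                cases hx : mask.testBit i <;> cases hy : endMask.testBit i <;> simp_all)).symm
            have hdrop : caps.drop index = caps[index] :: caps.drop (index + 1) :=
              List.drop_eq_getElem_cons hclen
            have hFAiff : pvFA q (caps.drop index) (endMask ^^^ mask) ↔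
                ((∃ s, s &&& (endMask ^^^ mask) = s ∧ 0 < s ∧ s ≤ endMask ^^^ mask ∧
                  pvMsum q s ≤ caps[index] ∧
                  pvFA q (caps.drop (index + 1)) ((endMask ^^^ mask) ^^^ s)) ∨
                  pvFA q (caps.drop (index + 1)) (endMask ^^^ mask)) := by
              rw [hdrop]
              simp only [pvFA]
              constructor
              · rintro (h | ⟨s, hs1, hs2, hs3, hs4⟩ | h)
                · exact absurd h hrem0
                · exact Or.inl ⟨s, hs1, hs2, pvSubLt _ _ hs1, hs3, hs4⟩
                · exact Or.inr h
              · rintro (⟨s, hs1, hs2, _, hs4, hs5⟩ | h)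
                · exact Or.inr (Or.inl ⟨s, hs1, hs2, hs4, hs5⟩)
                · exact Or.inr (Or.inr h)
            refine ⟨by rw [hval, hFAiff], ?_, ?_⟩
            · intro i msk w hi hmsk hget
              rcases eq_or_ne (i, msk) (index, mask) with he | hne
              · cases he
                rw [hgetL] at hget
                cases hget
                rw [hval, hFAiff]
              · rcases Nat.lt_or_ge i (index + 1) with hlt | hge
                · have hieq : i = index := by omega
                  subst hieq
                  rw [hframeL i msk (le_refl _) hne] at hget
                  exact hinv i msk w (le_refl _) hmsk hget
                · exact hinvL i msk w hge hmsk hget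
            · intro i msk hi hne
              exact hframeL i msk hi hne
  intro index
  exact main ck.length index (by omega)

-- ---------- exchange: pvFA ↔ pvFeas ↔ pvGL ----------
def pvMaskOf (p : Nat → Bool) : Nat → Nat
  | 0 => 0
  | n + 1 => pvMaskOf p n + (if p n then 2 ^ n else 0)

lemma pvMaskOf_lt (p : Nat → Bool) : ∀ n, pvMaskOf p n < 2 ^ n := by
  intro n; induction n with
  | zero => simp [pvMaskOf]
  | succ n IH =>
    simp only [pvMaskOf, pow_succ]
    split_ifs <;> omega

lemma pvMaskOf_testBit (p : Nat → Bool) : ∀ n i, (pvMaskOf p n).testBit i =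
    (decide (i < n) && p i) := by
  intro n; induction n with
  | zero => intro i; simp [pvMaskOf]
  | succ n IH =>
    intro i
    simp only [pvMaskOf]
    by_cases hp : p n
    · rw [if_pos hp, Nat.add_comm]
      have hor := Nat.two_pow_add_eq_or_of_lt (pvMaskOf_lt p n) 1
      rw [Nat.mul_one] at hor
      rw [hor, Nat.testBit_or, Nat.testBit_two_pow, IH]
      rcases Nat.lt_trichotomy i n with h | h | h
      · simp [h, Nat.ne_of_gt h]; omega
      · subst h; simp [hp]
      · have h1 : ¬ i < n := by omega
        have h2 : ¬ i < n + 1 := by omega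
        have h3 : n ≠ i := by omega
        simp [h1, h2, h3]
    · rw [if_neg hp, Nat.add_zero, IH]
      rcases Nat.lt_trichotomy i n with h | h | h
      · have : i < n + 1 := by omega
        simp [h, this]
      · subst h; simp [hp]
      · have h1 : ¬ i < n := by omega
        have h2 : ¬ i < n + 1 := by omega
        simp [h1, h2]

lemma pvE1 (q : List Int) : ∀ (caps : List Int), (∀ c ∈ caps, 0 ≤ c) →
    ∀ rem, rem < 2 ^ q.length → (pvFA q caps rem ↔ pvFeas q caps rem) := by
  intro caps
  induction caps with
  | nil =>
    intro _ rem hrem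
    simp only [pvFA, pvFeas]
    constructor
    · rintro rfl
      exact ⟨fun _ => 0, by simp, by simp⟩
    · rintro ⟨g, hg, -⟩
      by_contra hne
      obtain ⟨i, hi⟩ := Nat.exists_testBit_of_ne_zero hne
      have hilt : i < q.length := by
        by_contra hge
        have : rem < 2 ^ i := lt_of_lt_of_le hrem (Nat.pow_le_pow_right (by omega) (by omega))
        rw [Nat.testBit_lt_two_pow this] at hi; exact Bool.false_ne_true hi
      exact absurd (hg i hilt hi) (by simp)
  | cons c cs IH =>
    intro hnn rem hrem
    have hcs : ∀ x ∈ cs, 0 ≤ x := fun x hx => hnn x (List.mem_cons_of_mem _ hx)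
    have hc0 : 0 ≤ c := hnn c List.mem_cons_self
    constructor
    · intro hfa
      rcases hfa with hz | ⟨s, hs, hs0, hsum, hrest⟩ | hskip
      · subst hz
        refine ⟨fun _ => 0, by simp, ?_⟩
        intro j hj
        have hload : pvLoad q (fun _ => 0) j 0 = 0 := by simp [pvLoad]
        rw [hload]; exact hnn _ (List.getElem_mem hj)
      · have hxlt : (rem ^^^ s) < 2 ^ q.length := by
          have := pvSubLt _ _ (pvXorSub s rem hs); omega
        obtain ⟨g, hg, hload⟩ := (IH hcs _ hxlt).mp hrest
        refine ⟨fun b => if s.testBit b then 0 else g b + 1, ?_, ?_⟩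
        · intro b hb hbit
          by_cases hsb : s.testBit b
          · simp [hsb]
          · have hx : (rem ^^^ s).testBit b = true := by
              simp [Nat.testBit_xor, hbit, hsb]
            have := hg b hb hx
            simp [hsb]
            omega
        · intro j hj
          rcases j with _ | j'
          · have heq : pvLoad q (fun b => if s.testBit b then 0 else g b + 1) 0 rem
                = pvMsum q s := by
              apply Finset.sum_congr rfl
              intro b _
              by_cases hsb : s.testBit b
              · have hrb : rem.testBit b = true := by
                  have h' := congrArg (fun x => x.testBit b) hs
                  simp only [Nat.testBit_and] at h'
                  cases h2 : rem.testBit b <;> simp_all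
                simp [hsb, hrb]
              · simp [hsb]
            rw [heq]; simpa using hsum
          · have heq : pvLoad q (fun b => if s.testBit b then 0 else g b + 1) (j' + 1) rem
                = pvLoad q g j' (rem ^^^ s) := by
              apply Finset.sum_congr rfl
              intro b _
              by_cases hsb : s.testBit b
              · have hrb : rem.testBit b = true := by
                  have h' := congrArg (fun x => x.testBit b) hs
                  simp only [Nat.testBit_and] at h'
                  cases h2 : rem.testBit b <;> simp_all
                simp [hsb, hrb, Nat.testBit_xor]
              · by_cases hrb : rem.testBit b <;> simp [hrb, hsb, Nat.testBit_xor]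
            rw [heq]
            simpa using hload j' (by simpa using hj)
      · obtain ⟨g, hg, hload⟩ := (IH hcs _ hrem).mp hskip
        refine ⟨fun b => g b + 1, ?_, ?_⟩
        · intro b hb hbit
          have := hg b hb hbit
          simp only [List.length_cons]; omega
        · intro j hj
          rcases j with _ | j'
          · have heq : pvLoad q (fun b => g b + 1) 0 rem = 0 := by
              apply Finset.sum_eq_zero
              intro b _
              simp
            rw [heq]; simpa using hc0
          · have heq : pvLoad q (fun b => g b + 1) (j' + 1) rem = pvLoad q g j' rem := by
              apply Finset.sum_congr rfl
              intro b _
              simp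
            rw [heq]
            simpa using hload j' (by simpa using hj)
    · rintro ⟨g, hg, hload⟩
      by_cases hz : rem = 0
      · exact Or.inl hz
      · set s := pvMaskOf (fun b => rem.testBit b && g b == 0) q.length with hsdef
        have hsbit : ∀ i, s.testBit i =
            (decide (i < q.length) && (rem.testBit i && g i == 0)) := fun i =>
          pvMaskOf_testBit _ _ i
        have hs : s &&& rem = s := by
          apply Nat.eq_of_testBit_eq; intro i
          rw [Nat.testBit_and, hsbit i]
          cases h1 : rem.testBit i <;> simp_all
        have hmsum : pvMsum q s = pvLoad q g 0 rem := by
          apply Finset.sum_congr rfl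
          intro b hb
          rw [hsbit b]
          simp only [Finset.mem_range] at hb
          by_cases h1 : rem.testBit b <;> by_cases h2 : g b = 0 <;> simp [h1, h2, hb]
        have hrest : pvFA q cs (rem ^^^ s) := by
          have hxlt : (rem ^^^ s) < 2 ^ q.length := by
            have := pvSubLt _ _ (pvXorSub s rem hs); omega
          apply (IH hcs _ hxlt).mpr
          refine ⟨fun b => g b - 1, ?_, ?_⟩
          · intro b hb hbit
            have hxb := hbit
            rw [Nat.testBit_xor, hsbit b] at hxb
            have hrb : rem.testBit b = true := by
              cases h1 : rem.testBit b
              · simp [h1] at hxb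
              · rfl
            have hg0 : g b ≠ 0 := by
              intro hc; simp [hrb, hc, hb] at hxb
            have := hg b hb hrb
            simp only [List.length_cons] at this
            show g b - 1 < cs.length
            omega
          · intro j' hj'
            have heq : pvLoad q (fun b => g b - 1) j' (rem ^^^ s) =
                pvLoad q g (j' + 1) rem := by
              apply Finset.sum_congr rfl
              intro b hb
              simp only [Finset.mem_range] at hb
              rw [Nat.testBit_xor, hsbit b]
              by_cases h1 : rem.testBit b
              · by_cases h2 : g b = 0
                · simp [h1, h2, hb]
                · simp only [h1, hb, decide_true, Bool.true_and]
                  have hgj : (g b - 1 = j') ↔ (g b = j' + 1) := by omega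
                  simp [h2, hgj]
              · simp [h1]
            rw [heq]
            exact (by simpa using hload (j' + 1) (by simpa using hj'))
        by_cases hs0 : s = 0
        · refine Or.inr (Or.inr ?_)
          rw [hs0, Nat.xor_zero] at hrest
          exact hrest
        · refine Or.inr (Or.inl ⟨s, hs, Nat.pos_of_ne_zero hs0, ?_, hrest⟩)
          rw [hmsum]
          exact (by simpa using hload 0 (by simp))

-- suffix mask: bits k..m-1
def pvSfx (m k : Nat) : Nat := (2 ^ (m - k) - 1) <<< k

lemma pvSfx_testBit (m k i : Nat) : (pvSfx m k).testBit i = (decide (k ≤ i) && decide (i < m)) := by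
  rw [pvSfx, Nat.testBit_shiftLeft, Nat.testBit_two_pow_sub_one]
  by_cases h1 : k ≤ i <;> by_cases h2 : i < m <;> simp [h1, h2] <;> omega

lemma pvSfx_last (m : Nat) : pvSfx m m = 0 := by
  simp [pvSfx]

lemma pvLoad_sfx_succ (q : List Int) (g : Nat → Nat) (j k : Nat) (hk : k < q.length) :
    pvLoad q g j (pvSfx q.length k) =
    (if g k = j then q.getD k 0 else 0) + pvLoad q g j (pvSfx q.length (k + 1)) := by
  unfold pvLoad
  have hmem : k ∈ Finset.range q.length := Finset.mem_range.mpr hk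
  rw [← Finset.add_sum_erase _ _ hmem, ← Finset.add_sum_erase _ _ hmem]
  have h1 : (if (pvSfx q.length k).testBit k ∧ g k = j then q.getD k 0 else 0) =
      (if g k = j then q.getD k 0 else 0) := by
    have : (pvSfx q.length k).testBit k = true := by
      rw [pvSfx_testBit]; simp [hk]
    simp [this]
  have h2 : (if (pvSfx q.length (k+1)).testBit k ∧ g k = j then q.getD k 0 else 0) = 0 := by
    have : (pvSfx q.length (k+1)).testBit k = false := by
      rw [pvSfx_testBit]; simp
    simp [this]
  rw [h1, h2]
  have h3 : ∀ b ∈ (Finset.range q.length).erase k,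
      (if (pvSfx q.length k).testBit b ∧ g b = j then q.getD b 0 else 0) =
      (if (pvSfx q.length (k+1)).testBit b ∧ g b = j then q.getD b 0 else 0) := by
    intro b hb
    have hbk : b ≠ k := (Finset.mem_erase.mp hb).1
    have : (pvSfx q.length k).testBit b = (pvSfx q.length (k+1)).testBit b := by
      rw [pvSfx_testBit, pvSfx_testBit]
      by_cases h4 : b < q.length <;> by_cases h5 : k ≤ b <;>
        simp [h4, h5] <;> omega
    rw [this]
  rw [Finset.sum_congr rfl h3]
  ring

lemma pvLoad_nonneg (q : List Int) (hq : ∀ d ∈ q, 0 ≤ d) (g : Nat → Nat) (j rem : Nat) :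
    0 ≤ pvLoad q g j rem := by
  apply Finset.sum_nonneg
  intro b hb
  simp only [Finset.mem_range] at hb
  split_ifs
  · rw [List.getD_eq_getElem q 0 hb]
    exact hq _ (List.getElem_mem hb)
  · exact le_refl 0

lemma pvE2 (q : List Int) (hq : ∀ d ∈ q, 0 ≤ d) :
    ∀ n k, q.length - k ≤ n → k ≤ q.length → ∀ caps, (∀ c ∈ caps, 0 ≤ c) →
    (pvGL (List.drop k q) caps ↔ pvFeas q caps (pvSfx q.length k)) := by
  intro n
  induction n with
  | zero =>
    intro k hn hk caps hcaps
    have hkm : k = q.length := by omega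
    subst hkm
    rw [List.drop_length, pvSfx_last]
    simp only [pvGL, true_iff]
    refine ⟨fun _ => 0, by simp, ?_⟩
    intro j hj
    have h0 : pvLoad q (fun _ => 0) j 0 = 0 := by simp [pvLoad]
    rw [h0]
    exact hcaps _ (List.getElem_mem hj)
  | succ n IHn =>
    intro k hn hk caps hcaps
    rcases Nat.eq_or_lt_of_le hk with hkm | hkm
    · subst hkm
      rw [List.drop_length, pvSfx_last]
      simp only [pvGL, true_iff]
      refine ⟨fun _ => 0, by simp, ?_⟩
      intro j hj
      have h0 : pvLoad q (fun _ => 0) j 0 = 0 := by simp [pvLoad]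
      rw [h0]
      exact hcaps _ (List.getElem_mem hj)
    · have hdrop : List.drop k q = q[k] :: List.drop (k + 1) q :=
        List.drop_eq_getElem_cons hkm
      have hqk : q.getD k 0 = q[k] := List.getD_eq_getElem q 0 hkm
      rw [hdrop]
      constructor
      · rintro ⟨j, hj, hle, hGL⟩
        have hset : ∀ c ∈ caps.set j (caps[j] - q[k]), 0 ≤ c := by
          intro c hc
          rcases List.mem_or_eq_of_mem_set hc with h | h
          · exact hcaps c h
          · subst h; omega
        obtain ⟨g, hg, hload⟩ := (IHn (k + 1) (by omega) (by omega) _ hset).mp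
          (by simpa using hGL)
        refine ⟨fun b => if b = k then j else g b, ?_, ?_⟩
        · intro b hb hbit
          by_cases hbk : b = k
          · simpa [hbk] using hj
          · rw [pvSfx_testBit] at hbit
            have hb2 : (pvSfx q.length (k + 1)).testBit b = true := by
              rw [pvSfx_testBit]
              simp only [Bool.and_eq_true, decide_eq_true_eq] at hbit ⊢
              omega
            simpa [hbk] using hg b hb hb2
        · intro j' hj'
          rw [pvLoad_sfx_succ q _ j' k hkm]
          have hsame : pvLoad q (fun b => if b = k then j else g b) j'
              (pvSfx q.length (k + 1)) = pvLoad q g j' (pvSfx q.length (k + 1)) := by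
            apply Finset.sum_congr rfl
            intro b _
            by_cases hbk : b = k
            · subst hbk
              have hb0 : (pvSfx q.length (b + 1)).testBit b = false := by
                rw [pvSfx_testBit]; simp
              simp [hb0]
            · simp [hbk]
          rw [hsame]
          have hfk : (if k = k then j else g k) = j := if_pos rfl
          rw [hfk]
          by_cases hjj : j = j'
          · subst hjj
            rw [if_pos rfl]
            have hl := hload j (by simpa using hj)
            have hset2 : (caps.set j (caps[j] - q[k]))[j]'(by simpa using hj) =
                caps[j] - q[k] := List.getElem_set_self _
            rw [hset2] at hl
            rw [hqk]
            omega
          · rw [if_neg hjj]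
            have hl := hload j' (by simpa using hj')
            have hset2 : (caps.set j (caps[j] - q[k]))[j']'(by simpa using hj') =
                caps[j']'hj' := List.getElem_set_ne (by omega) _
            rw [hset2] at hl
            omega
      · rintro ⟨g, hg, hload⟩
        have hbitk : (pvSfx q.length k).testBit k = true := by
          rw [pvSfx_testBit]; simp [hkm]
        have hj : g k < caps.length := hg k hkm hbitk
        have hsplit : ∀ j', pvLoad q g j' (pvSfx q.length k) =
            (if g k = j' then q.getD k 0 else 0) + pvLoad q g j' (pvSfx q.length (k + 1)) :=
          fun j' => pvLoad_sfx_succ q g j' k hkm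
        have hle : q[k] ≤ caps[g k] := by
          have hl := hload (g k) hj
          rw [hsplit (g k)] at hl
          have := pvLoad_nonneg q hq g (g k) (pvSfx q.length (k + 1))
          rw [hqk, if_pos (rfl : g k = g k)] at hl
          omega
        refine ⟨g k, hj, hle, ?_⟩
        have hset : ∀ c ∈ caps.set (g k) (caps[g k] - q[k]), 0 ≤ c := by
          intro c hc
          rcases List.mem_or_eq_of_mem_set hc with h | h
          · exact hcaps c h
          · subst h; omega
        apply (IHn (k + 1) (by omega) (by omega) _ hset).mpr
        refine ⟨g, ?_, ?_⟩
        · intro b hb hbit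
          rw [pvSfx_testBit] at hbit
          have hb2 : (pvSfx q.length k).testBit b = true := by
            rw [pvSfx_testBit]
            simp only [Bool.and_eq_true, decide_eq_true_eq] at hbit ⊢
            omega
          simpa using hg b hb hb2
        · intro j' hj'
          have hj'c : j' < caps.length := by simpa using hj'
          have hl := hload j' hj'c
          rw [hsplit j'] at hl
          by_cases hjj : g k = j'
          · subst hjj
            rw [if_pos rfl, hqk] at hl
            have hset2 : (caps.set (g k) (caps[g k] - q[k]))[g k]'hj' =
                caps[g k] - q[k] := List.getElem_set_self _
            rw [hset2]
            omega
          · rw [if_neg hjj] at hl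
            have hset2 : (caps.set (g k) (caps[g k] - q[k]))[j']'hj' =
                caps[j']'hj'c := List.getElem_set_ne (by omega) _
            rw [hset2]
            omega

lemma pvFeasReindex (q : List Int) (caps caps' : List Int) (σ : Nat → Nat)
    (hlen : caps'.length = caps.length)
    (hσlt : ∀ j, j < caps.length → σ j < caps.length)
    (hσσ : ∀ j, j < caps.length → σ (σ j) = j)
    (hvals : ∀ j, j < caps'.length → caps'.getD j 0 = caps.getD (σ j) 0)
    (rem : Nat) : pvFeas q caps rem → pvFeas q caps' rem := by
  rintro ⟨g, hg, hload⟩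
  refine ⟨fun b => σ (g b), ?_, ?_⟩
  · intro b hb hbit
    rw [hlen]
    exact hσlt _ (hg b hb hbit)
  · intro j hj
    have hjc : j < caps.length := hlen ▸ hj
    have heq : pvLoad q (fun b => σ (g b)) j rem = pvLoad q g (σ j) rem := by
      apply Finset.sum_congr rfl
      intro b hb
      simp only [Finset.mem_range] at hb
      by_cases hbit : rem.testBit b
      · have hgb := hg b hb hbit
        have hcond : (σ (g b) = j) ↔ (g b = σ j) := by
          constructor
          · intro h; rw [← hσσ (g b) hgb, h]
          · intro h; rw [h, hσσ j hjc]
        simp [hbit, hcond]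
      · simp [hbit]
    have hv : caps'[j] = caps[σ j]'(hσlt _ hjc) := by
      have := hvals j hj
      rw [List.getD_eq_getElem _ 0 hj, List.getD_eq_getElem _ 0 (hσlt _ hjc)] at this
      exact this
    rw [heq, hv]
    exact hload (σ j) (hσlt j hjc)

lemma pvFeasReverse (q : List Int) (caps : List Int) (rem : Nat) :
    pvFeas q caps rem ↔ pvFeas q caps.reverse rem := by
  constructor
  · apply pvFeasReindex q caps caps.reverse (fun x => caps.length - 1 - x)
      (List.length_reverse)
      (fun j hj => by show caps.length - 1 - j < caps.length; omega)
      (fun j hj => by show caps.length - 1 - (caps.length - 1 - j) = j; omega)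
    intro j hj
    show caps.reverse.getD j 0 = caps.getD (caps.length - 1 - j) 0
    have hjl : j < caps.length := by simpa using hj
    rw [List.getD_eq_getElem _ 0 hj, List.getD_eq_getElem _ 0 (by omega)]
    exact List.getElem_reverse _
  · intro h
    apply pvFeasReindex q caps.reverse caps (fun x => caps.reverse.length - 1 - x)
      (by simp)
      (fun j hj => by show caps.reverse.length - 1 - j < caps.reverse.length; omega)
      (fun j hj => by
        show caps.reverse.length - 1 - (caps.reverse.length - 1 - j) = j
        simp only [List.length_reverse] at hj ⊢
        omega) ?_ rem h
    intro j hj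
    show caps.getD j 0 = caps.reverse.getD (caps.reverse.length - 1 - j) 0
    have hjl : j < caps.reverse.length := by simpa using hj
    rw [List.getD_eq_getElem _ 0 hj, List.getD_eq_getElem _ 0 (by simp at hjl ⊢; omega)]
    rw [List.getElem_reverse]
    congr 1
    simp only [List.length_reverse]
    omega

lemma pvGLSwapHead (a b : Int) (l caps : List Int) (ha : 0 ≤ a) (_hb : 0 ≤ b) :
    pvGL (a :: b :: l) caps → pvGL (b :: a :: l) caps := by
  rintro ⟨j, hj, hja, j', hj', hjb, hGL⟩
  by_cases hjj : j' = j
  · subst hjj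
    have hlen : j' < (caps.set j' (caps[j'] - a)).length := by simpa using hj
    have hv2 : (caps.set j' (caps[j'] - a))[j']'hlen = caps[j'] - a :=
      List.getElem_set_self _
    rw [hv2] at hjb
    rw [hv2, List.set_set] at hGL
    refine ⟨j', hj, by omega, j', by simpa using hj, ?_, ?_⟩
    · rw [List.getElem_set_self]; omega
    · rw [List.getElem_set_self, List.set_set]
      have hvv : caps[j'] - b - a = caps[j'] - a - b := by ring
      rw [hvv]
      exact hGL
  · have hj'c : j' < caps.length := by simpa using hj'
    have hvb : (caps.set j (caps[j] - a))[j']'hj' = caps[j']'hj'c :=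
      List.getElem_set_ne (by omega) _
    rw [hvb] at hjb
    refine ⟨j', hj'c, hjb, j, by simpa using hj, ?_, ?_⟩
    · rw [List.getElem_set_ne (by omega)]; exact hja
    · rw [List.getElem_set_ne (by omega)]
      rw [hvb] at hGL
      rw [List.set_comm _ _ (by omega)] at hGL
      exact hGL

lemma pvGLPerm {ds ds' : List Int} (p : ds.Perm ds') :
    (∀ d ∈ ds, 0 ≤ d) → ∀ caps, pvGL ds caps ↔ pvGL ds' caps := by
  induction p with
  | nil => intro _ caps; rfl
  | cons x p IH =>
    intro h caps
    simp only [pvGL]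
    exact exists_congr fun j => exists_congr fun hj => and_congr_right fun _ =>
      IH (fun d hd => h d (List.mem_cons_of_mem _ hd)) _
  | swap x y l =>
    intro h caps
    have hx : 0 ≤ x := h x (by simp)
    have hy : 0 ≤ y := h y (by simp)
    exact ⟨pvGLSwapHead y x l caps hy hx, pvGLSwapHead x y l caps hx hy⟩
  | trans p1 p2 IH1 IH2 =>
    intro h caps
    exact (IH1 h caps).trans (IH2 (fun d hd => h d (p1.symm.subset hd)) caps)

lemma pvGLFeas (ds caps : List Int) (hds : ∀ d ∈ ds, 0 ≤ d) (hcaps : ∀ c ∈ caps, 0 ≤ c) :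
    pvGL ds caps ↔ pvFeas ds caps (pvSfx ds.length 0) := by
  have := pvE2 ds hds ds.length 0 (by omega) (by omega) caps hcaps
  simpa using this

lemma pvGLValueSwap (ds caps : List Int) (i k : Nat) (hi : i < caps.length)
    (hk : k < caps.length) (hik : i ≠ k) (hv : caps[i] = caps[k]) (w : Int)
    (hds : ∀ d ∈ ds, 0 ≤ d) (hc : ∀ c ∈ caps, 0 ≤ c) (hw : 0 ≤ w) :
    pvGL ds (caps.set i w) ↔ pvGL ds (caps.set k w) := by
  have hnn : ∀ (p : Nat), ∀ c ∈ caps.set p w, 0 ≤ c := by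
    intro p c hcmem
    rcases List.mem_or_eq_of_mem_set hcmem with h | h
    · exact hc c h
    · subst h; exact hw
  have hre : ∀ (p r : Nat) (hp : p < caps.length) (hr : r < caps.length), p ≠ r →
      caps[p]'hp = caps[r]'hr →
      pvFeas ds (caps.set p w) (pvSfx ds.length 0) →
      pvFeas ds (caps.set r w) (pvSfx ds.length 0) := by
    intro p r hp hr hpr hpv hfeas
    apply pvFeasReindex ds (caps.set p w) (caps.set r w)
      (fun x => if x = p then r else if x = r then p else x)
      (by simp) ?_ ?_ ?_ _ hfeas
    · intro j hj
      simp only [List.length_set] at hj ⊢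
      split_ifs <;> omega
    · intro j hj
      beta_reduce
      by_cases h1 : j = p
      · subst h1
        rw [if_pos rfl, if_neg (by omega), if_pos rfl]
      · by_cases h2 : j = r
        · subst h2
          rw [if_neg h1, if_pos rfl, if_pos rfl]
        · rw [if_neg h1, if_neg h2, if_neg h1, if_neg h2]
    · intro j hj
      have hjlen : j < caps.length := by simpa using hj
      show (caps.set r w).getD j 0 = (caps.set p w).getD (if j = p then r else if j = r then p else j) 0
      by_cases h1 : j = p
      · subst h1
        rw [if_pos rfl]
        rw [List.getD_eq_getElem _ 0 (by simpa using hjlen),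
          List.getD_eq_getElem _ 0 (by simpa using hr)]
        rw [List.getElem_set_ne (show r ≠ j by omega),
          List.getElem_set_ne (show j ≠ r from hpr)]
        exact hpv
      · by_cases h2 : j = r
        · subst h2
          rw [if_neg h1, if_pos rfl]
          rw [List.getD_eq_getElem _ 0 (by simpa using hjlen),
            List.getD_eq_getElem _ 0 (by simpa using hp)]
          rw [List.getElem_set_self, List.getElem_set_self]
        · rw [if_neg h1, if_neg h2]
          rw [List.getD_eq_getElem _ 0 (by simpa using hjlen),
            List.getD_eq_getElem _ 0 (by simpa using hjlen)]
          rw [List.getElem_set_ne (show r ≠ j by omega),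
            List.getElem_set_ne (show p ≠ j by omega)]
  constructor
  · intro h
    apply (pvGLFeas ds (caps.set k w) hds (hnn k)).mpr
    exact hre i k hi hk hik hv ((pvGLFeas ds (caps.set i w) hds (hnn i)).mp h)
  · intro h
    apply (pvGLFeas ds (caps.set i w) hds (hnn i)).mpr
    exact hre k i hk hi (by omega) hv.symm ((pvGLFeas ds (caps.set k w) hds (hnn k)).mp h)

-- ---------- B's backtracking computes pvGL ----------
lemma pvLoopB_spec (d : Int) (ds : List Int)
    (IHpb : ∀ caps' : List Int, (∀ c ∈ caps', 0 ≤ c) →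
      (pvPlaceB ds caps' = true ↔ pvGL ds caps'))
    (hds : ∀ x ∈ ds, 0 ≤ x) :
    ∀ fuel (j : Nat) (caps : List Int) (tried : PySem.Set Int),
      caps.length - j ≤ fuel → (∀ c ∈ caps, 0 ≤ c) →
      (∀ v ∈ tried, d ≤ v ∧ ∃ j0, ∃ h0 : j0 < caps.length, caps[j0] = v ∧
        ¬ pvGL ds (caps.set j0 (v - d))) →
      (pvLoopB d ds caps j tried = true ↔
        ∃ jj, ∃ hjj : jj < caps.length, j ≤ jj ∧ d ≤ caps[jj] ∧
          pvGL ds (caps.set jj (caps[jj] - d))) := by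
  intro fuel
  induction fuel with
  | zero =>
    intro j caps tried hfuel hcaps htried
    have hj : ¬ j < caps.length := by omega
    rw [pvLoopB, dif_neg hj]
    simp only [Bool.false_eq_true, false_iff]
    rintro ⟨jj, hjj, hge, -, -⟩
    omega
  | succ fuel IHf =>
    intro j caps tried hfuel hcaps htried
    by_cases hj : j < caps.length
    · rw [pvLoopB, dif_pos hj]
      have hsetnn : ∀ w : Int, 0 ≤ w → ∀ c ∈ caps.set j w, 0 ≤ c := by
        intro w hw c hc
        rcases List.mem_or_eq_of_mem_set hc with h | h
        · exact hcaps c h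
        · subst h; exact hw
      by_cases hd : d ≤ caps[j]
      · by_cases ht : caps[j] ∈ tried
        · -- skipped: an equal capacity was already tried and failed
          have hcond : (decide (d ≤ caps[j]) && !(PySem.Set.contains tried caps[j])) = false := by
            have hct : PySem.Set.contains tried caps[j] = true :=
              (PySem.Set.contains_iff _ _).mpr ht
            rw [hct]
            simp
          simp only [hcond, Bool.false_eq_true, reduceIte]
          rw [IHf (j + 1) caps tried (by omega) hcaps htried]
          constructor
          · rintro ⟨jj, hjj, hge, hle, hGL⟩
            exact ⟨jj, hjj, by omega, hle, hGL⟩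
          · rintro ⟨jj, hjj, hge, hle, hGL⟩
            rcases Nat.eq_or_lt_of_le hge with he | hlt
            · exfalso
              obtain ⟨hdv, j0, h0, hval, hnGL⟩ := htried caps[j] ht
              subst he
              by_cases hj0 : j0 = j
              · subst hj0
                rw [hval] at hGL
                exact hnGL hGL
              · have hswap := (pvGLValueSwap ds caps j0 j h0 hjj hj0 (by rw [hval])
                  (caps[j] - d) hds hcaps (by omega)).mpr
                exact hnGL (hswap hGL)
            · exact ⟨jj, hjj, by omega, hle, hGL⟩
        · have hcond : (decide (d ≤ caps[j]) && !(PySem.Set.contains tried caps[j])) = true := by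
            have hcf : PySem.Set.contains tried caps[j] = false := by
              cases hcc : PySem.Set.contains tried caps[j]
              · rfl
              · exact absurd ((PySem.Set.contains_iff _ _).mp hcc) ht
            rw [hcf, decide_eq_true hd]
            rfl
          simp only [hcond, reduceIte]
          by_cases hpb : pvPlaceB ds (caps.set j (caps[j] - d)) = true
          · rw [if_pos hpb]
            simp only [true_iff]
            exact ⟨j, hj, le_refl _, hd,
              (IHpb _ (hsetnn _ (by omega))).mp hpb⟩
          · rw [if_neg hpb]
            have hnGL : ¬ pvGL ds (caps.set j (caps[j] - d)) := by
              intro hc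
              exact hpb ((IHpb _ (hsetnn _ (by omega))).mpr hc)
            have htried' : ∀ v ∈ PySem.Set.add tried caps[j], d ≤ v ∧ ∃ j0,
                ∃ h0 : j0 < caps.length, caps[j0] = v ∧
                ¬ pvGL ds (caps.set j0 (v - d)) := by
              intro v hv
              rcases (PySem.Set.mem_add _ _ _).mp hv with h | h
              · exact htried v h
              · subst h
                exact ⟨hd, j, hj, rfl, hnGL⟩
            rw [IHf (j + 1) caps _ (by omega) hcaps htried']
            constructor
            · rintro ⟨jj, hjj, hge, hle, hGL⟩
              exact ⟨jj, hjj, by omega, hle, hGL⟩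
            · rintro ⟨jj, hjj, hge, hle, hGL⟩
              rcases Nat.eq_or_lt_of_le hge with he | hlt
              · subst he
                exact absurd hGL hnGL
              · exact ⟨jj, hjj, by omega, hle, hGL⟩
      · have hcond : (decide (d ≤ caps[j]) && !(PySem.Set.contains tried caps[j])) = false := by
          simp [hd]
        simp only [hcond, Bool.false_eq_true, reduceIte]
        rw [IHf (j + 1) caps tried (by omega) hcaps htried]
        constructor
        · rintro ⟨jj, hjj, hge, hle, hGL⟩
          exact ⟨jj, hjj, by omega, hle, hGL⟩
        · rintro ⟨jj, hjj, hge, hle, hGL⟩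
          rcases Nat.eq_or_lt_of_le hge with he | hlt
          · subst he; exact absurd hle hd
          · exact ⟨jj, hjj, by omega, hle, hGL⟩
    · rw [pvLoopB, dif_neg hj]
      simp only [Bool.false_eq_true, false_iff]
      rintro ⟨jj, hjj, hge, -, -⟩
      omega

lemma pvPlaceB_GL : ∀ (ds caps : List Int), (∀ d ∈ ds, 0 ≤ d) → (∀ c ∈ caps, 0 ≤ c) →
    (pvPlaceB ds caps = true ↔ pvGL ds caps) := by
  intro ds
  induction ds with
  | nil =>
    intro caps _ _
    simp [pvPlaceB, pvGL]
  | cons d ds IH =>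
    intro caps hds hcaps
    have hds' : ∀ x ∈ ds, 0 ≤ x := fun x hx => hds x (List.mem_cons_of_mem _ hx)
    rw [pvPlaceB]
    rw [pvLoopB_spec d ds (fun caps' h => IH caps' hds' h) hds' caps.length 0 caps
      PySem.Set.empty (by omega) hcaps (by intro v hv; simp [PySem.Set.empty] at hv)]
    simp only [pvGL]
    constructor
    · rintro ⟨jj, hjj, -, hle, hGL⟩
      exact ⟨jj, hjj, hle, hGL⟩
    · rintro ⟨jj, hjj, hle, hGL⟩
      exact ⟨jj, hjj, by omega, hle, hGL⟩

-- ---------- assembling the two ports ----------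
def pvKeyF (nums : List Int) : Int → Int := fun k => (PySem.Dict.counter nums).getD k 0

def pvCk (nums quantity : List Int) : List Int :=
  PySem.List.slice (PySem.List.sorted (PySem.Dict.counter nums).keys (pvKeyF nums))
    (some (-(quantity.length : Int))) none

def pvCapsA (nums quantity : List Int) : List Int := (pvCk nums quantity).map (pvKeyF nums)

def pvMT (quantity : List Int) : PySem.Dict Nat Int :=
  (List.range ((1 <<< quantity.length) - 1 + 1)).foldl (fun d i =>
    d.insert i ((List.range quantity.length).foldl (fun total b =>
      if i &&& (1 <<< b) ≠ 0 then total + PySem.List.pyGetD quantity (b : Int) 0 else total) 0))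
    PySem.Dict.empty

def pvCapsB (nums quantity : List Int) : List Int :=
  PySem.List.slice (PySem.List.sorted (PySem.Dict.counter nums).values (fun x => x) true)
    none (some (quantity.length : Int))

lemma pvCan_eq (nums quantity : List Int) : canDistribute nums quantity =
    (pvDfsA (pvCk nums quantity) (PySem.Dict.counter nums) (pvMT quantity)
      ((1 <<< quantity.length) - 1) 0 0 PySem.Dict.empty).1 := rfl

lemma pvAlt_eq (nums quantity : List Int) : canDistribute_alt nums quantity =
    pvPlaceB (PySem.List.sorted quantity (fun x => x) true) (pvCapsB nums quantity) := rfl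

lemma pvFoldInsertGetD (f : Nat → Int) : ∀ (l : List Nat) (d : PySem.Dict Nat Int) (kk : Nat),
    (l.foldl (fun d i => d.insert i (f i)) d).getD kk 0 =
      if kk ∈ l then f kk else d.getD kk 0 := by
  intro l
  induction l with
  | nil => intro d kk; simp
  | cons i t IH =>
    intro d kk
    rw [List.foldl_cons, IH]
    by_cases h1 : kk ∈ t
    · simp [h1]
    · by_cases h2 : kk = i
      · subst h2
        simp [h1]
      · simp [h1, h2, PySem.Dict.getD_insert]

lemma pvFoldRangeSum (p : Nat → Prop) [DecidablePred p] (g : Nat → Int) :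
    ∀ (m : Nat) (acc : Int),
      (List.range m).foldl (fun t b => if p b then t + g b else t) acc =
      acc + ∑ b ∈ Finset.range m, (if p b then g b else 0) := by
  intro m
  induction m with
  | zero => intro acc; simp
  | succ m IH =>
    intro acc
    rw [List.range_succ, List.foldl_append, IH, Finset.sum_range_succ, List.foldl_cons,
      List.foldl_nil]
    split_ifs <;> ring

lemma pvAndPowNe (i b : Nat) : (i &&& (1 <<< b) ≠ 0) ↔ i.testBit b = true := by
  rw [Nat.one_shiftLeft]
  constructor
  · intro h
    obtain ⟨j, hj⟩ := Nat.exists_testBit_of_ne_zero h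
    rw [Nat.testBit_and] at hj
    rcases Bool.and_eq_true_iff.mp hj with ⟨h1, h2⟩
    rw [Nat.testBit_two_pow] at h2
    have : b = j := by simpa using h2
    rw [this]; exact h1
  · intro h hc
    have h2 := congrArg (fun x => x.testBit b) hc
    simp only [Nat.testBit_and, Nat.zero_testBit, h, Nat.testBit_two_pow_self,
      Bool.and_self] at h2
    exact Bool.noConfusion h2

lemma pvMT_getD (quantity : List Int) (s : Nat) (hs : s ≤ (1 <<< quantity.length) - 1) :
    (pvMT quantity).getD s 0 = pvMsum quantity s := by
  rw [pvMT, pvFoldInsertGetD]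
  rw [if_pos (List.mem_range.mpr (by omega))]
  rw [pvFoldRangeSum (fun b => s &&& (1 <<< b) ≠ 0)
    (fun b => PySem.List.pyGetD quantity (b : Int) 0) quantity.length 0, zero_add]
  apply Finset.sum_congr rfl
  intro b _
  by_cases ht : s.testBit b
  · rw [if_pos ((pvAndPowNe s b).mpr ht), if_pos ht, PySem.List.pyGetD_natCast]
  · rw [if_neg (fun hc => ht ((pvAndPowNe s b).mp hc)), if_neg ht]

lemma pvA_iff (nums quantity : List Int) : canDistribute nums quantity = true ↔
    pvFA quantity (pvCapsA nums quantity) ((1 <<< quantity.length) - 1) := by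
  rw [pvCan_eq]
  have hend : ((1 <<< quantity.length) - 1 : Nat) = 2 ^ quantity.length - 1 := by
    rw [Nat.one_shiftLeft]
  obtain ⟨hval, -, -⟩ := pvDfsA_spec quantity (pvCk nums quantity) (PySem.Dict.counter nums)
    (pvMT quantity) ((1 <<< quantity.length) - 1) (pvCapsA nums quantity) rfl hend
    (fun s hs => pvMT_getD quantity s hs) 0 0 PySem.Dict.empty (Nat.zero_and _)
    (by intro i msk v _ _ hget; rw [PySem.Dict.get?_empty] at hget; cases hget)
  rw [hval, List.drop_zero, Nat.xor_zero]

lemma pvCapsA_pos (nums quantity : List Int) : ∀ c ∈ pvCapsA nums quantity, 1 ≤ c := by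
  intro c hc
  obtain ⟨k, hk, rfl⟩ := List.mem_map.mp hc
  have hk2 : k ∈ PySem.List.sorted (PySem.Dict.counter nums).keys (pvKeyF nums) :=
    PySem.List.mem_of_mem_slice _ _ _ hk
  have hk3 : k ∈ (PySem.Dict.counter nums).keys := (PySem.List.mem_sorted _ _ _ _).mp hk2
  rw [PySem.Dict.keys_counter] at hk3
  have hk4 : k ∈ nums := (PySem.Set.mem_ofList _ _).mp hk3
  show 1 ≤ pvKeyF nums k
  rw [pvKeyF, PySem.Dict.getD_counter]
  have : 0 < nums.count k := List.count_pos_iff.mpr hk4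
  omega

lemma pvCaps_rel (nums quantity : List Int) (hm : 0 < quantity.length) :
    pvCapsB nums quantity = (pvCapsA nums quantity).reverse := by
  have hnodup := PySem.Dict.nodup_keys_counter (xs := nums)
  have hVsorted : ((PySem.List.sorted (PySem.Dict.counter nums).keys (pvKeyF nums)).map
      (pvKeyF nums)).Pairwise (· ≤ ·) := by
    rw [List.pairwise_map]
    exact PySem.List.sorted_pairwise _ _
  have hVperm : ((PySem.List.sorted (PySem.Dict.counter nums).keys (pvKeyF nums)).map
      (pvKeyF nums)).Perm (PySem.Dict.counter nums).values := by
    have h1 := (PySem.List.sorted_perm (PySem.Dict.counter nums).keys (pvKeyF nums)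
      false).map (pvKeyF nums)
    rw [PySem.Dict.values_eq_map_keys _ hnodup 0]
    exact h1
  set V := (PySem.List.sorted (PySem.Dict.counter nums).keys (pvKeyF nums)).map
    (pvKeyF nums) with hV
  have hdesc : PySem.List.sorted (PySem.Dict.counter nums).values (fun x => x) true =
      V.reverse := by
    apply PySem.List.eq_of_perm_of_pairwise_le_of_injective (fun x : Int => -x)
      neg_injective
    · exact ((PySem.List.sorted_perm _ _ _).trans hVperm.symm).trans V.reverse_perm.symm
    · have := PySem.List.sorted_pairwise_rev (PySem.Dict.counter nums).values
        (fun x : Int => x)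
      exact this.imp (by intro a b h; omega)
    · rw [List.pairwise_reverse]
      exact hVsorted.imp (by intro a b h; omega)
  rw [pvCapsB, PySem.List.slice_to_natCast, hdesc, List.take_reverse]
  rw [pvCapsA, pvCk, PySem.List.slice_from_neg_natCast _ _ hm, List.map_drop]
  rw [List.length_map]

lemma pvTrivialEmpty (nums : List Int) : canDistribute nums [] = true ∧
    canDistribute_alt nums [] = true := by
  constructor
  · rw [pvCan_eq, pvDfsA]
    simp
  · rw [pvAlt_eq]
    have hs : PySem.List.sorted ([] : List Int) (fun x => x) true = [] := rfl
    rw [hs, pvPlaceB]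

lemma pvMainNonneg (nums quantity : List Int) (hq : ∀ x ∈ quantity, 0 ≤ x) :
    canDistribute nums quantity = canDistribute_alt nums quantity := by
  by_cases hq0 : quantity = []
  · subst hq0
    rw [(pvTrivialEmpty nums).1, (pvTrivialEmpty nums).2]
  · have hm : 0 < quantity.length := List.length_pos_iff.mpr hq0
    have hcapsApos := pvCapsA_pos nums quantity
    have hcapsAnn : ∀ c ∈ pvCapsA nums quantity, 0 ≤ c := fun c hc => by
      have := hcapsApos c hc; omega
    have hcapsBnn : ∀ c ∈ pvCapsB nums quantity, 0 ≤ c := by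
      intro c hc
      rw [pvCaps_rel nums quantity hm, List.mem_reverse] at hc
      exact hcapsAnn c hc
    have hdemnn : ∀ d ∈ PySem.List.sorted quantity (fun x => x) true, 0 ≤ d := by
      intro d hd
      exact hq d ((PySem.List.mem_sorted _ _ _ _).mp hd)
    have hendlt : (1 <<< quantity.length) - 1 < 2 ^ quantity.length := by
      rw [Nat.one_shiftLeft]
      have : 0 < 2 ^ quantity.length := pow_pos (by omega : (0:ℕ) < 2) _
      omega
    have hsfx0 : pvSfx quantity.length 0 = (1 <<< quantity.length) - 1 := by
      rw [pvSfx, Nat.one_shiftLeft, Nat.sub_zero, Nat.shiftLeft_zero]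
    rw [Bool.eq_iff_iff, pvA_iff, pvAlt_eq]
    rw [pvPlaceB_GL _ _ hdemnn hcapsBnn]
    rw [← pvGLPerm (PySem.List.sorted_perm quantity (fun x => x) true).symm hq
      (pvCapsB nums quantity)]
    have hE2 := pvE2 quantity hq quantity.length 0 (by omega) (by omega)
      (pvCapsB nums quantity) hcapsBnn
    rw [List.drop_zero, hsfx0] at hE2
    rw [hE2]
    rw [pvCaps_rel nums quantity hm]
    rw [← pvFeasReverse]
    exact pvE1 quantity (pvCapsA nums quantity) hcapsAnn _ hendlt

lemma pvMainNums (nums quantity : List Int) (h : nums = []) :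
    canDistribute nums quantity = canDistribute_alt nums quantity := by
  subst h
  by_cases hq0 : quantity = []
  · subst hq0
    rw [(pvTrivialEmpty []).1, (pvTrivialEmpty []).2]
  · have hm : 0 < quantity.length := List.length_pos_iff.mpr hq0
    have hck : pvCk [] quantity = [] := by
      rw [pvCk]
      have h1 : (PySem.Dict.counter ([] : List Int)).keys = [] := rfl
      have h2 : PySem.List.sorted ([] : List Int) (pvKeyF []) = [] := rfl
      rw [h1, h2, PySem.List.slice_some_none, List.drop_nil]
    have hA : canDistribute [] quantity = false := by
      rw [pvCan_eq, pvDfsA, hck]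
      have hne : (0 : Nat) ≠ (1 <<< quantity.length) - 1 := by
        rw [Nat.one_shiftLeft]
        have : 2 ≤ 2 ^ quantity.length := by
          calc 2 = 2 ^ 1 := rfl
          _ ≤ 2 ^ quantity.length := Nat.pow_le_pow_right (by omega) (by omega)
        omega
      rw [if_neg hne, dif_pos (by simp)]
    have hB : canDistribute_alt [] quantity = false := by
      rw [pvAlt_eq]
      have hcapsB : pvCapsB [] quantity = [] := by
        rw [pvCapsB]
        have h1 : (PySem.Dict.counter ([] : List Int)).values = [] := rfl
        have h2 : PySem.List.sorted ([] : List Int) (fun x : Int => x) true = [] := rfl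
        rw [h1, h2, PySem.List.slice_to_natCast, List.take_nil]
      rw [hcapsB]
      have hdne : PySem.List.sorted quantity (fun x => x) true ≠ [] := by
        rw [Ne, PySem.List.sorted_eq_nil_iff]
        exact hq0
      obtain ⟨d, ds, hds⟩ := List.exists_cons_of_ne_nil hdne
      rw [hds, pvPlaceB, pvLoopB, dif_neg (by simp)]
    rw [hA, hB]

lemma pvPlaceNonpos : ∀ (ds : List Int) (c : Int) (cs : List Int),
    (∀ d ∈ ds, d ≤ 0) → 0 ≤ c → pvPlaceB ds (c :: cs) = true := by
  intro ds
  induction ds with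
  | nil => intro c cs _ _; rw [pvPlaceB]
  | cons d ds IH =>
    intro c cs hds hc
    have hd : d ≤ 0 := hds d (by simp)
    rw [pvPlaceB, pvLoopB, dif_pos (by simp : 0 < (c :: cs).length)]
    have hcond : (decide (d ≤ (c :: cs)[0]) &&
        !(PySem.Set.contains PySem.Set.empty (c :: cs)[0])) = true := by
      show (decide (d ≤ c) && !(PySem.Set.contains PySem.Set.empty c)) = true
      rw [decide_eq_true (by omega : d ≤ c)]
      rfl
    simp only [hcond, reduceIte]
    have hset : (c :: cs).set 0 ((c :: cs)[0] - d) = (c - d) :: cs := rfl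
    rw [hset, IH _ _ (fun x hx => hds x (by simp [hx])) (by omega)]
    simp

lemma pvMainNonpos (nums quantity : List Int) (hq : ∀ x ∈ quantity, x ≤ 0) :
    canDistribute nums quantity = canDistribute_alt nums quantity := by
  by_cases hq0 : quantity = []
  · subst hq0
    rw [(pvTrivialEmpty nums).1, (pvTrivialEmpty nums).2]
  by_cases hn : nums = []
  · exact pvMainNums nums quantity hn
  have hm : 0 < quantity.length := List.length_pos_iff.mpr hq0
  -- capsA is nonempty
  have hkeysne : (PySem.Dict.counter nums).keys ≠ [] := by
    rw [PySem.Dict.keys_counter]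
    obtain ⟨x, xs, rfl⟩ := List.exists_cons_of_ne_nil hn
    intro hc
    have : x ∈ PySem.Set.ofList (x :: xs) := (PySem.Set.mem_ofList _ _).mpr (by simp)
    rw [hc] at this
    cases this
  have hLpos : 0 < (PySem.List.sorted (PySem.Dict.counter nums).keys (pvKeyF nums)).length := by
    rw [PySem.List.length_sorted]
    exact List.length_pos_iff.mpr hkeysne
  have hcklen : 0 < (pvCapsA nums quantity).length := by
    rw [pvCapsA, List.length_map, pvCk, PySem.List.slice_from_neg_natCast _ _ hm,
      List.length_drop]
    omega
  obtain ⟨c, cs, hccs⟩ := List.exists_cons_of_ne_nil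
    (List.length_pos_iff.mp hcklen)
  have hcpos : 1 ≤ c := by
    apply pvCapsA_pos nums quantity
    rw [hccs]; simp
  have hendpos : 0 < (1 <<< quantity.length) - 1 := by
    rw [Nat.one_shiftLeft]
    have : 2 ≤ 2 ^ quantity.length := by
      calc 2 = 2 ^ 1 := rfl
      _ ≤ 2 ^ quantity.length := Nat.pow_le_pow_right (by omega) (by omega)
    omega
  have hA : canDistribute nums quantity = true := by
    rw [pvA_iff, hccs]
    refine Or.inr (Or.inl ⟨(1 <<< quantity.length) - 1, Nat.and_self _, hendpos, ?_, ?_⟩)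
    · have hsum : pvMsum quantity ((1 <<< quantity.length) - 1) ≤ 0 := by
        apply Finset.sum_nonpos
        intro b hb
        simp only [Finset.mem_range] at hb
        split_ifs
        · rw [List.getD_eq_getElem _ 0 hb]
          exact hq _ (List.getElem_mem hb)
        · exact le_refl 0
      omega
    · rw [Nat.xor_self]
      exact pvFA_zero _ _
  have hB : canDistribute_alt nums quantity = true := by
    rw [pvAlt_eq]
    have hrel := pvCaps_rel nums quantity hm
    have hBlen : 0 < (pvCapsB nums quantity).length := by
      rw [hrel, List.length_reverse]; exact hcklen
    obtain ⟨c', cs', hccs'⟩ := List.exists_cons_of_ne_nil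
      (List.length_pos_iff.mp hBlen)
    have hc'pos : 0 ≤ c' := by
      have : c' ∈ pvCapsB nums quantity := by rw [hccs']; simp
      rw [hrel, List.mem_reverse] at this
      have := pvCapsA_pos nums quantity c' this
      omega
    rw [hccs']
    exact pvPlaceNonpos _ c' cs' (fun d hd =>
      hq d ((PySem.List.mem_sorted _ _ _ _).mp hd)) hc'pos
  rw [hA, hB]

-- ===== VERDICT (by name: the statement is the Claim_ definition above) =====
theorem canDistribute_spec : Claim_equal_canDistribute := by
  intro nums quantity _ hpre
  unfold Spec_canDistribute
  rcases hpre with h | h | h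
  · exact pvMainNonneg nums quantity h
  · exact pvMainNonpos nums quantity h
  · exact pvMainNums nums quantity h
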